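-- pv_equiv track=rewrite | github.com/Aryan2005-unq/lead_engine | kimi/email_scrap/scripts/Fix Companies Name/fix_company_names.py | find_column_case_insensitive
-- ===== SOURCE A (Python) =====
-- def find_column_case_insensitive(row, candidates):
--     """Find a column value using case-insensitive matching."""
--     row_lower = {k.lower(): v for k, v in row.items()}
--     for candidate in candidates:
--         candidate_lower = candidate.lower()
--         if candidate_lower in row_lower:
--             value = row_lower[candidate_lower]
--             if value and str(value).strip():
--                 return str(value).strip()
--     return ""
-- ===== SOURCE B (Python) =====
-- def find_column_case_insensitive(row, candidates):
--     """Find a column value using case-insensitive matching (no intermediate dict)."""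
--     for candidate in candidates:
--         candidate_lower = candidate.lower()
--         match = None
--         found = False
--         for k, v in row.items():
--             if k.lower() == candidate_lower:
--                 match = v
--                 found = True
--         if found:
--             s = str(match).strip()
--             if s:
--                 return s
--     return ""
-- ===== Notes on version B (the rewrite author's own statement) =====
-- stated objective: alternative
-- what changed: B eliminates A's intermediate lowered-key dict: for each candidate it scans the row directly, remembering the last key whose lowercase form matches (preserving dict-override semantics), trading the one-time dict build for a per-candidate row scan.
import Mathlib
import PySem

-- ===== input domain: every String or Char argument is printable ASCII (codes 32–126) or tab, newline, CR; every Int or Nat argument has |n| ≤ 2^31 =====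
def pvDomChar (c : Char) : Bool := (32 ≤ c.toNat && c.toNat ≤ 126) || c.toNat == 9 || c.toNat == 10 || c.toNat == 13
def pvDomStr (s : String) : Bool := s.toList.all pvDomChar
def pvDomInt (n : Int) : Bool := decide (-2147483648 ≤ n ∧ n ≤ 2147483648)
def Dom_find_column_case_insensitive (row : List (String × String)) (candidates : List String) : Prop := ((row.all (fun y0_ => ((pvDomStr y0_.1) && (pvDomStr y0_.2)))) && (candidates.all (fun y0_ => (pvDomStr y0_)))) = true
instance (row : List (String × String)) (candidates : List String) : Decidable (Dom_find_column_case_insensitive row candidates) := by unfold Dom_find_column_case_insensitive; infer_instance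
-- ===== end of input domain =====

-- B drops A's intermediate lowered-key dict and scans the row per candidate, keeping the
-- last matching value (objective: alternative — no intermediate dict is materialised; per-candidate row scan instead).

-- ===== PORT A =====
-- the candidate loop of A, with row_lower already built
def fciLoopA (row_lower : PySem.Dict String String) : List String → String
  | [] => ""
  | candidate :: rest =>
    let candidate_lower := PySem.Str.lower candidate
    if row_lower.contains candidate_lower then
      let value := (row_lower.get? candidate_lower).getD ""
      if value ≠ "" ∧ PySem.Str.strip value ≠ "" then PySem.Str.strip value
      else fciLoopA row_lower rest
    else fciLoopA row_lower rest

def find_column_case_insensitive (row : List (String × String)) (candidates : List String) : String :=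
  let row_lower : PySem.Dict String String :=
    row.foldl (fun d kv => d.insert (PySem.Str.lower kv.1) kv.2) PySem.Dict.empty
  fciLoopA row_lower candidates

-- ===== PORT B =====
-- inner row scan of B: last value whose lowered key equals cl (none if no key matches)
def fciLastMatch (row : List (String × String)) (cl : String) : Option String :=
  row.foldl (fun acc kv => if PySem.Str.lower kv.1 == cl then some kv.2 else acc) none

def find_column_case_insensitive_alt (row : List (String × String)) (candidates : List String) : String :=
  match candidates with
  | [] => ""
  | candidate :: rest =>
    match fciLastMatch row (PySem.Str.lower candidate) with
    | some v =>
      let s := PySem.Str.strip v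
      if s ≠ "" then s else find_column_case_insensitive_alt row rest
    | none => find_column_case_insensitive_alt row rest

-- ===== PRECONDITION & SPEC =====
def Spec_find_column_case_insensitive (row : List (String × String)) (candidates : List String) (out : String) : Prop := out = find_column_case_insensitive_alt row candidates
instance (row : List (String × String)) (candidates : List String) (out : String) : Decidable (Spec_find_column_case_insensitive row candidates out) := by unfold Spec_find_column_case_insensitive; infer_instance

-- ===== CLAIM (what is proved, stated in full; the proofs are below) =====
def Claim_equal_find_column_case_insensitive : Prop := ∀ (row : List (String × String)) (candidates : List String), Dom_find_column_case_insensitive row candidates → Spec_find_column_case_insensitive row candidates (find_column_case_insensitive row candidates)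

-- ===== LEMMAS AND PROOFS =====

-- the dict built by A answers get? with the LAST matching pair, i.e. B's fciLastMatch
theorem fci_get_eq_last (row : List (String × String)) (cl : String)
    (d : PySem.Dict String String) :
    (row.foldl (fun d kv => d.insert (PySem.Str.lower kv.1) kv.2) d).get? cl
      = row.foldl (fun acc kv => if PySem.Str.lower kv.1 == cl then some kv.2 else acc) (d.get? cl) := by
  induction row generalizing d with
  | nil => rfl
  | cons kv rest ih =>
    simp only [List.foldl_cons]
    rw [ih]
    by_cases h : PySem.Str.lower kv.1 = cl
    · simp [h, PySem.Dict.get?_insert_self]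
    · have hne : cl ≠ PySem.Str.lower kv.1 := fun e => h e.symm
      simp [PySem.Dict.get?_insert_of_ne _ _ hne, beq_iff_eq, h]

theorem fci_get_eq_lastMatch (row : List (String × String)) (cl : String) :
    (row.foldl (fun d kv => d.insert (PySem.Str.lower kv.1) kv.2) PySem.Dict.empty).get? cl
      = fciLastMatch row cl := by
  rw [fci_get_eq_last]; rfl

theorem strip_empty : PySem.Str.strip "" = "" := by decide

-- ===== VERDICT (by name: the statement is the Claim_ definition above) =====
theorem fci_loop_eq (row : List (String × String)) (candidates : List String) :
    fciLoopA (row.foldl (fun d kv => d.insert (PySem.Str.lower kv.1) kv.2) PySem.Dict.empty) candidates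
      = find_column_case_insensitive_alt row candidates := by
  induction candidates with
  | nil => rfl
  | cons c rest ih =>
    simp only [fciLoopA, find_column_case_insensitive_alt]
    have hget := fci_get_eq_lastMatch row (PySem.Str.lower c)
    by_cases hc : (row.foldl (fun d kv => d.insert (PySem.Str.lower kv.1) kv.2) PySem.Dict.empty).contains (PySem.Str.lower c)
    · rw [if_pos hc]
      rcases hv : fciLastMatch row (PySem.Str.lower c) with _ | v
      · exfalso
        have := (PySem.Dict.get?_eq_none_iff_contains
          (d := row.foldl (fun d kv => d.insert (PySem.Str.lower kv.1) kv.2) PySem.Dict.empty)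
          (k := PySem.Str.lower c))
        rw [hget, hv] at this
        simp [hc] at this
      · rw [hget, hv]
        simp only [Option.getD_some]
        by_cases hs : PySem.Str.strip v = ""
        · simp only [hs]
          simpa using ih
        · by_cases hv0 : v = ""
          · exfalso; rw [hv0, strip_empty] at hs; exact hs rfl
          · simp [hv0, hs]
    · rw [if_neg hc]
      rcases hv : fciLastMatch row (PySem.Str.lower c) with _ | v
      · exact ih
      · exfalso
        have := (PySem.Dict.get?_eq_none_iff_contains
          (d := row.foldl (fun d kv => d.insert (PySem.Str.lower kv.1) kv.2) PySem.Dict.empty)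
          (k := PySem.Str.lower c))
        rw [hget, hv] at this
        simp [hc] at this

theorem find_column_case_insensitive_spec : Claim_equal_find_column_case_insensitive := by
  intro row candidates _
  unfold Spec_find_column_case_insensitive find_column_case_insensitive
  exact fci_loop_eq row candidates
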